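-- pv_equiv track=rewrite | github.com/egaskin/2026_P4L | src/hw1/main.py | sum_of_maxima
-- ===== SOURCE A (Python) =====
-- def sum_of_maxima(sample1: dict[str, int], sample2: dict[str, int]) -> int:
--     """
--     Compute the sum of corresponding maximum values of two frequency tables.
--
--     Args:
--         sample1: A frequency table mapping strings to integers.
--         sample2: A frequency table mapping strings to integers.
--     Returns:
--         The sum of the maximum values for each string appearing in either sample.
--     """
--     # range over all the species in sample1 and see how many (if any) are in sample2
--     # NOTE: since we want maxima, we will need to check both of them since sample2 could
--     # have a species that sample1 does not have
--
--     # let's get a list of all UNIQUE species using set notation and list appending for convenience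
--     set_all_species = set(list(sample1.keys()) + list(sample2.keys()))
--
--     cumulative_sum_of_maxima = 0
--     for species_i in set_all_species:
--         num_species_i_sample1 = sample1.get(species_i, 0)
--         num_species_i_sample2 = sample2.get(species_i, 0)
--         max_val = max2(num_species_i_sample1, num_species_i_sample2)
--         cumulative_sum_of_maxima += max_val
--     return cumulative_sum_of_maxima
--
-- def max2(x: int, y: int) -> int:
--     """
--     Return the maximum of two integers.
--
--     Args:
--         x: An integer.
--         y: An integer.
--     Returns:
--         The larger of x and y.
--     """
--     if x > y:
--         return x
--     return y
-- ===== SOURCE B (Python) =====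
-- def sum_of_maxima(sample1: dict[str, int], sample2: dict[str, int]) -> int:
--     # Sort-and-merge instead of a hash union: sort both item lists by key and
--     # walk them with two pointers; equal keys contribute max(v1, v2), a key
--     # present in only one table contributes max(v, 0) (the other count is 0).
--     items1 = sorted(sample1.items(), key=lambda kv: kv[0])
--     items2 = sorted(sample2.items(), key=lambda kv: kv[0])
--     i = j = 0
--     total = 0
--     while i < len(items1) and j < len(items2):
--         k1, v1 = items1[i]
--         k2, v2 = items2[j]
--         if k1 == k2:
--             total += v1 if v1 > v2 else v2
--             i += 1
--             j += 1
--         elif k1 < k2: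
--             total += v1 if v1 > 0 else 0
--             i += 1
--         else:
--             total += v2 if v2 > 0 else 0
--             j += 1
--     while i < len(items1):
--         v = items1[i][1]
--         total += v if v > 0 else 0
--         i += 1
--     while j < len(items2):
--         v = items2[j][1]
--         total += v if v > 0 else 0
--         j += 1
--     return total
-- ===== Notes on version B (the rewrite author's own statement) =====
-- stated objective: alternative
-- what changed: B replaces A's hash-union of key sets and per-key dict lookups by sorting both item lists by key and summing per-key maxima in a single two-pointer merge (keys in one table only contribute max(v,0)).
import Mathlib
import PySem

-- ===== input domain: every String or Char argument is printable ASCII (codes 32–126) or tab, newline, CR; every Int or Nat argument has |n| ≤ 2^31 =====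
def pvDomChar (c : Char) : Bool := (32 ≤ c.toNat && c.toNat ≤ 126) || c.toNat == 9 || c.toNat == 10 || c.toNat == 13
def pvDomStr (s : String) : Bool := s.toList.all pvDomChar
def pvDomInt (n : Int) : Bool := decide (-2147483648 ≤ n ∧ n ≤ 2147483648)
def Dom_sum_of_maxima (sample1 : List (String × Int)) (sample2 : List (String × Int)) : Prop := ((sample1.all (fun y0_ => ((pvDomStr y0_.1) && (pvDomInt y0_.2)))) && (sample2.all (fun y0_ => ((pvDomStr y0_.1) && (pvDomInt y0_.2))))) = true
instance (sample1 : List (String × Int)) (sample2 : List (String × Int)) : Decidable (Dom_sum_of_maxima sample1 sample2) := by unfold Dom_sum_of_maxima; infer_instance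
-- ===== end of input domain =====

-- B replaces A's hash-union of key sets and per-key dict lookups by sorting both
-- item lists by key and summing per-key maxima in one two-pointer merge; objective: alternative.

-- ===== PORT A =====
-- helper max2 of A, step for step
def max2 (x y : Int) : Int := if x > y then x else y

def sum_of_maxima (sample1 : List (String × Int)) (sample2 : List (String × Int)) : Int :=
  -- set(list(sample1.keys()) + list(sample2.keys()))
  let set_all_species : PySem.Set String :=
    PySem.Set.ofList (sample1.map Prod.fst ++ sample2.map Prod.fst)
  -- the for-loop accumulating max2 of the two .get(k, 0) lookups (first-match assoc lookup)
  set_all_species.foldl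
    (fun acc k => acc + max2 ((sample1.lookup k).getD 0) ((sample2.lookup k).getD 0)) 0

-- ===== PORT B =====
-- the central two-pointer while loop of Source B as the obvious recursion over the two
-- (sorted) suffixes, carrying the same `total` accumulator; the trailing while
-- loops are the cases where one suffix is exhausted
def pvMergeSum : List (String × Int) → List (String × Int) → Int → Int
  | [], l2, total => l2.foldl (fun a kv => a + (if kv.2 > 0 then kv.2 else 0)) total
  | p :: t1, [], total =>
      pvMergeSum t1 [] (total + (if p.2 > 0 then p.2 else 0))
  | (k1, v1) :: t1, (k2, v2) :: t2, total =>
      if k1 = k2 then pvMergeSum t1 t2 (total + (if v1 > v2 then v1 else v2))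
      else if k1 < k2 then pvMergeSum t1 ((k2, v2) :: t2) (total + (if v1 > 0 then v1 else 0))
      else pvMergeSum ((k1, v1) :: t1) t2 (total + (if v2 > 0 then v2 else 0))
termination_by l1 l2 _ => l1.length + l2.length
decreasing_by all_goals (simp [List.length_cons]; try omega)

def sum_of_maxima_alt (sample1 : List (String × Int)) (sample2 : List (String × Int)) : Int :=
  -- items1 = sorted(sample1.items(), key=lambda kv: kv[0]); same for items2
  let items1 := PySem.List.sorted sample1 (fun kv => kv.1) false
  let items2 := PySem.List.sorted sample2 (fun kv => kv.1) false
  pvMergeSum items1 items2 0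

-- ===== PRECONDITION & SPEC =====
-- The Lean arguments are association lists standing for Python dicts, which cannot
-- hold duplicate keys; Pre_ states exactly that dict shape (no other narrowing).
def Pre_sum_of_maxima (sample1 : List (String × Int)) (sample2 : List (String × Int)) : Prop :=
  (sample1.map Prod.fst).Nodup ∧ (sample2.map Prod.fst).Nodup
instance (sample1 : List (String × Int)) (sample2 : List (String × Int)) : Decidable (Pre_sum_of_maxima sample1 sample2) := by unfold Pre_sum_of_maxima; infer_instance

def pvWitness_sum_of_maxima : (List (String × Int)) × (List (String × Int)) :=
  ([("a", 3), ("b", -2)], [("b", 5), ("c", -1)])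

def Spec_sum_of_maxima (sample1 : List (String × Int)) (sample2 : List (String × Int)) (out : Int) : Prop := out = sum_of_maxima_alt sample1 sample2
instance (sample1 : List (String × Int)) (sample2 : List (String × Int)) (out : Int) : Decidable (Spec_sum_of_maxima sample1 sample2 out) := by unfold Spec_sum_of_maxima; infer_instance

-- ===== CLAIM (what is proved, stated in full; the proofs are below) =====
def Claim_equal_sum_of_maxima : Prop := ∀ (sample1 : List (String × Int)) (sample2 : List (String × Int)), Dom_sum_of_maxima sample1 sample2 → Pre_sum_of_maxima sample1 sample2 → Spec_sum_of_maxima sample1 sample2 (sum_of_maxima sample1 sample2)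

-- ===== LEMMAS AND PROOFS =====

-- merge of the two key lists, mirroring pvMergeSum's traversal
def pvMKeys : List String → List String → List String
  | [], b => b
  | a, [] => a
  | x :: a, y :: b =>
      if x = y then x :: pvMKeys a b
      else if x < y then x :: pvMKeys a (y :: b)
      else y :: pvMKeys (x :: a) b
termination_by a b => a.length + b.length
decreasing_by all_goals (simp [List.length_cons]; try omega)

theorem max2_eq_max (x y : Int) : max2 x y = max x y := by
  unfold max2; rw [max_def]; split_ifs <;> omega

theorem if_gt_eq_max (x y : Int) : (if x > y then x else y) = max x y := by
  rw [max_def]; split_ifs <;> omega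

theorem mem_pvMKeys (a b : List String) (k : String) :
    k ∈ pvMKeys a b ↔ k ∈ a ∨ k ∈ b := by
  fun_induction pvMKeys a b with
  | case1 b => simp
  | case2 a h => simp
  | case3 a y b ih => simp only [List.mem_cons, ih]; tauto
  | case4 x a y b hne hlt ih => simp only [List.mem_cons, ih]; tauto
  | case5 x a y b hne hnlt ih => simp only [List.mem_cons, ih]; tauto

theorem pairwise_pvMKeys {a b : List String}
    (ha : a.Pairwise (· < ·)) (hb : b.Pairwise (· < ·)) :
    (pvMKeys a b).Pairwise (· < ·) := by
  fun_induction pvMKeys a b with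
  | case1 b => exact hb
  | case2 a h => exact ha
  | case3 a y b ih =>
      rw [List.pairwise_cons] at ha hb ⊢
      refine ⟨?_, ih ha.2 hb.2⟩
      intro z hz
      rcases (mem_pvMKeys _ _ _).mp hz with h | h
      · exact ha.1 z h
      · exact hb.1 z h
  | case4 x a y b hne hlt ih =>
      rw [List.pairwise_cons] at ha ⊢
      refine ⟨?_, ih ha.2 hb⟩
      intro z hz
      rcases (mem_pvMKeys _ _ _).mp hz with h | h
      · exact ha.1 z h
      · rcases List.mem_cons.mp h with rfl | h
        · exact hlt
        · exact lt_trans hlt ((List.pairwise_cons.mp hb).1 z h)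
  | case5 x a y b hne hnlt ih =>
      rw [List.pairwise_cons] at hb ⊢
      have hyx : y < x := lt_of_le_of_ne (not_lt.mp hnlt) (fun h => hne h.symm)
      refine ⟨?_, ih ha hb.2⟩
      intro z hz
      rcases (mem_pvMKeys _ _ _).mp hz with h | h
      · rcases List.mem_cons.mp h with rfl | h
        · exact hyx
        · exact lt_trans hyx ((List.pairwise_cons.mp ha).1 z h)
      · exact hb.1 z h

-- first-match assoc lookup misses ↦ none
theorem lookup_eq_none_of_not_mem {l : List (String × Int)} {k : String}
    (h : k ∉ l.map Prod.fst) : l.lookup k = none := by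
  induction l with
  | nil => rfl
  | cons p t ih =>
    simp only [List.map_cons, List.mem_cons, not_or] at h
    have hne : (k == p.1) = false := by simpa [beq_iff_eq] using h.1
    simpa [List.lookup, hne] using ih h.2

-- with Nodup keys, a member pair is what lookup finds
theorem lookup_eq_some_of_mem {l : List (String × Int)} {k : String} {v : Int}
    (hnd : (l.map Prod.fst).Nodup) (h : (k, v) ∈ l) : l.lookup k = some v := by
  induction l with
  | nil => simp at h
  | cons p t ih =>
    simp only [List.map_cons, List.nodup_cons] at hnd
    rcases List.mem_cons.mp h with h | h
    · subst h; simp [List.lookup]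
    · have hne : (k == p.1) = false := by
        have : k ∈ t.map Prod.fst := List.mem_map.mpr ⟨(k, v), h, rfl⟩
        simp only [beq_eq_false_iff_ne, ne_eq]
        rintro rfl; exact hnd.1 this
      simpa [List.lookup, hne] using ih hnd.2 h

theorem mem_of_lookup_eq_some {l : List (String × Int)} {k : String} {v : Int}
    (h : l.lookup k = some v) : (k, v) ∈ l := by
  induction l with
  | nil => simp [List.lookup] at h
  | cons p t ih =>
    obtain ⟨a, b⟩ := p
    by_cases hk : k = a
    · subst hk
      simp only [List.lookup, BEq.rfl, Option.some_inj] at h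
      subst h
      simp
    · have hne : (k == a) = false := by simpa [beq_iff_eq] using hk
      simp only [List.lookup, hne] at h
      exact List.mem_cons_of_mem _ (ih h)

-- lookup is membership-determined for nodup-key lists: invariant under permutation
theorem lookup_eq_of_perm {l l' : List (String × Int)} {k : String}
    (hp : l'.Perm l) (hnd : (l.map Prod.fst).Nodup) : l'.lookup k = l.lookup k := by
  cases hl : l.lookup k with
  | none =>
    have hk : k ∉ l.map Prod.fst := by
      intro hmem
      rcases List.mem_map.mp hmem with ⟨⟨k', v⟩, hm, hk'⟩
      cases hk'
      rw [lookup_eq_some_of_mem hnd hm] at hl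
      simp at hl
    exact lookup_eq_none_of_not_mem (fun h => hk ((hp.map Prod.fst).mem_iff.mp h))
  | some v =>
    have hm : (k, v) ∈ l' := hp.mem_iff.mpr (mem_of_lookup_eq_some hl)
    exact lookup_eq_some_of_mem (((hp.map Prod.fst).nodup_iff).mpr hnd) hm

theorem lookup_cons_ne {p : String × Int} {t : List (String × Int)} {k : String}
    (h : k ≠ p.1) : (p :: t).lookup k = t.lookup k := by
  have hb : (k == p.1) = false := by simpa [beq_iff_eq] using h
  simp [List.lookup, hb]

theorem nodup_keys_of_strict {l : List (String × Int)}
    (h : l.Pairwise (fun a b => a.1 < b.1)) : (l.map Prod.fst).Nodup :=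
  (List.pairwise_map.mpr h).imp ne_of_lt

theorem strict_of_le_nodup {l : List (String × Int)}
    (hle : l.Pairwise (fun a b => a.1 ≤ b.1)) (hnd : (l.map Prod.fst).Nodup) :
    l.Pairwise (fun a b => a.1 < b.1) :=
  (hle.and (List.pairwise_map.mp hnd)).imp (fun h => lt_of_le_of_ne h.1 h.2)

theorem head_key_lt {p : String × Int} {t : List (String × Int)}
    (h : (p :: t).Pairwise (fun a b => a.1 < b.1)) :
    ∀ k ∈ t.map Prod.fst, p.1 < k := by
  intro k hk
  rcases List.mem_map.mp hk with ⟨q, hq, rfl⟩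
  exact (List.pairwise_cons.mp h).1 q hq

-- a map over the key list by (looked-up value) is the map over the items by value
theorem map_keys_lookup {l : List (String × Int)} (G : Int → Int)
    (hnd : (l.map Prod.fst).Nodup) :
    (l.map Prod.fst).map (fun k => G ((l.lookup k).getD 0)) = l.map (fun kv => G kv.2) := by
  induction l with
  | nil => rfl
  | cons p t ih =>
    simp only [List.map_cons, List.nodup_cons] at hnd ⊢
    rw [show List.lookup p.1 (p :: t) = some p.2 by simp [List.lookup]]
    simp only [Option.getD_some]
    congr 1
    rw [← ih hnd.2]
    exact List.map_congr_left (fun k hk => by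
      rw [lookup_cons_ne (fun h => hnd.1 (h ▸ hk))])

-- the merge recursion computes the sum of per-key maxima over the merged key list
theorem pvMergeSum_eq (l1 l2 : List (String × Int)) (total : Int) :
    l1.Pairwise (fun a b => a.1 < b.1) → l2.Pairwise (fun a b => a.1 < b.1) →
    pvMergeSum l1 l2 total =
      total + ((pvMKeys (l1.map Prod.fst) (l2.map Prod.fst)).map
        (fun k => max ((l1.lookup k).getD 0) ((l2.lookup k).getD 0))).sum := by
  fun_induction pvMergeSum l1 l2 total with
  | case1 l2 total =>
    intro _ h2
    rw [PySem.List.foldl_add]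
    congr 1
    simp only [List.map_nil, pvMKeys]
    have := map_keys_lookup (fun v => max 0 v) (nodup_keys_of_strict h2)
    simp only [List.lookup, Option.getD_none] at this ⊢
    rw [this]
    refine congrArg List.sum (List.map_congr_left (fun kv _ => ?_))
    rw [if_gt_eq_max, max_comm]
  | case2 p t1 total ih =>
    intro h1 _
    simp only [dite_eq_ite] at ih
    rw [ih (List.pairwise_cons.mp h1).2 List.Pairwise.nil]
    simp only [List.map_cons, List.map_nil]
    have hk : pvMKeys (p.1 :: t1.map Prod.fst) [] = p.1 :: t1.map Prod.fst := by
      simp [pvMKeys]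
    rw [hk]
    have hk2 : pvMKeys (t1.map Prod.fst) [] = t1.map Prod.fst := by
      cases h : t1.map Prod.fst <;> simp [pvMKeys]
    rw [hk2]
    simp only [List.map_cons, List.sum_cons]
    have hhead : ((p :: t1).lookup p.1).getD 0 = p.2 := by simp [List.lookup]
    have htail : (t1.map Prod.fst).map
        (fun k => max (((p :: t1).lookup k).getD 0) ((([] : List (String × Int)).lookup k).getD 0))
        = (t1.map Prod.fst).map
        (fun k => max ((t1.lookup k).getD 0) ((([] : List (String × Int)).lookup k).getD 0)) := by
      refine List.map_congr_left (fun k hk => ?_)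
      rw [lookup_cons_ne (ne_of_gt (head_key_lt h1 k hk))]
    rw [htail, hhead]
    simp only [List.lookup, Option.getD_none]
    rw [if_gt_eq_max]
    ring
  | case3 v1 t1 k v2 t2 total ih =>
    intro h1 h2
    simp only [dite_eq_ite] at ih
    rw [ih (List.pairwise_cons.mp h1).2 (List.pairwise_cons.mp h2).2]
    simp only [List.map_cons]
    have hk : pvMKeys (k :: t1.map Prod.fst) (k :: t2.map Prod.fst)
        = k :: pvMKeys (t1.map Prod.fst) (t2.map Prod.fst) := by
      simp [pvMKeys]
    rw [hk]
    simp only [List.map_cons, List.sum_cons]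
    have hne : ∀ k' ∈ pvMKeys (t1.map Prod.fst) (t2.map Prod.fst), k' ≠ k := by
      intro k' hk'
      rcases (mem_pvMKeys _ _ _).mp hk' with h | h
      · exact ne_of_gt (head_key_lt h1 k' h)
      · exact ne_of_gt (head_key_lt h2 k' h)
    have htail : (pvMKeys (t1.map Prod.fst) (t2.map Prod.fst)).map
        (fun k' => max ((((k, v1) :: t1).lookup k').getD 0) ((((k, v2) :: t2).lookup k').getD 0))
        = (pvMKeys (t1.map Prod.fst) (t2.map Prod.fst)).map
        (fun k' => max ((t1.lookup k').getD 0) ((t2.lookup k').getD 0)) := by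
      refine List.map_congr_left (fun k' hk' => ?_)
      rw [lookup_cons_ne (hne k' hk'), lookup_cons_ne (hne k' hk')]
    rw [htail]
    have hhead : max ((((k, v1) :: t1).lookup k).getD 0) ((((k, v2) :: t2).lookup k).getD 0)
        = max v1 v2 := by simp [List.lookup]
    rw [hhead, if_gt_eq_max]
    ring
  | case4 k1 v1 t1 k2 v2 t2 total hne hlt ih =>
    intro h1 h2
    simp only [dite_eq_ite] at ih
    rw [ih (List.pairwise_cons.mp h1).2 h2]
    simp only [List.map_cons]
    have hk : pvMKeys (k1 :: t1.map Prod.fst) (k2 :: t2.map Prod.fst)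
        = k1 :: pvMKeys (t1.map Prod.fst) (k2 :: t2.map Prod.fst) := by
      simp [pvMKeys, hne, hlt]
    rw [hk]
    simp only [List.map_cons, List.sum_cons]
    have hnk : ∀ k' ∈ pvMKeys (t1.map Prod.fst) (k2 :: t2.map Prod.fst), k' ≠ k1 := by
      intro k' hk'
      rcases (mem_pvMKeys _ _ _).mp hk' with h | h
      · exact ne_of_gt (head_key_lt h1 k' h)
      · rcases List.mem_cons.mp h with rfl | h
        · exact ne_of_gt hlt
        · exact ne_of_gt (lt_trans hlt (head_key_lt h2 k' h))
    have htail : (pvMKeys (t1.map Prod.fst) (k2 :: t2.map Prod.fst)).map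
        (fun k' => max ((((k1, v1) :: t1).lookup k').getD 0) ((((k2, v2) :: t2).lookup k').getD 0))
        = (pvMKeys (t1.map Prod.fst) (k2 :: t2.map Prod.fst)).map
        (fun k' => max ((t1.lookup k').getD 0) ((((k2, v2) :: t2).lookup k').getD 0)) := by
      refine List.map_congr_left (fun k' hk' => ?_)
      rw [lookup_cons_ne (hnk k' hk')]
    rw [htail]
    have hmiss : ((k2, v2) :: t2).lookup k1 = none := by
      refine lookup_eq_none_of_not_mem ?_
      simp only [List.map_cons, List.mem_cons, not_or]
      exact ⟨hne, fun h => absurd (head_key_lt h2 k1 h) (not_lt.mpr (le_of_lt hlt))⟩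
    have hhead : max ((((k1, v1) :: t1).lookup k1).getD 0) ((((k2, v2) :: t2).lookup k1).getD 0)
        = max v1 0 := by rw [hmiss]; simp [List.lookup]
    rw [hhead, if_gt_eq_max]
    ring
  | case5 k1 v1 t1 k2 v2 t2 total hne hnlt ih =>
    intro h1 h2
    simp only [dite_eq_ite] at ih
    have hgt : k2 < k1 := lt_of_le_of_ne (not_lt.mp hnlt) (fun h => hne h.symm)
    rw [ih h1 (List.pairwise_cons.mp h2).2]
    simp only [List.map_cons]
    have hk : pvMKeys (k1 :: t1.map Prod.fst) (k2 :: t2.map Prod.fst)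
        = k2 :: pvMKeys (k1 :: t1.map Prod.fst) (t2.map Prod.fst) := by
      simp [pvMKeys, hne, hnlt]
    rw [hk]
    simp only [List.map_cons, List.sum_cons]
    have hnk : ∀ k' ∈ pvMKeys (k1 :: t1.map Prod.fst) (t2.map Prod.fst), k' ≠ k2 := by
      intro k' hk'
      rcases (mem_pvMKeys _ _ _).mp hk' with h | h
      · rcases List.mem_cons.mp h with rfl | h
        · exact ne_of_gt hgt
        · exact ne_of_gt (lt_trans hgt (head_key_lt h1 k' h))
      · exact ne_of_gt (head_key_lt h2 k' h)
    have htail : (pvMKeys (k1 :: t1.map Prod.fst) (t2.map Prod.fst)).map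
        (fun k' => max ((((k1, v1) :: t1).lookup k').getD 0) ((((k2, v2) :: t2).lookup k').getD 0))
        = (pvMKeys (k1 :: t1.map Prod.fst) (t2.map Prod.fst)).map
        (fun k' => max ((((k1, v1) :: t1).lookup k').getD 0) ((t2.lookup k').getD 0)) := by
      refine List.map_congr_left (fun k' hk' => ?_)
      rw [show List.lookup k' ((k2, v2) :: t2) = List.lookup k' t2
        from lookup_cons_ne (hnk k' hk')]
    rw [htail]
    have hmiss : ((k1, v1) :: t1).lookup k2 = none := by
      refine lookup_eq_none_of_not_mem ?_
      simp only [List.map_cons, List.mem_cons, not_or]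
      exact ⟨fun h => hne h.symm, fun h => absurd (head_key_lt h1 k2 h) (not_lt.mpr (le_of_lt hgt))⟩
    have hhead : max ((((k1, v1) :: t1).lookup k2).getD 0) ((((k2, v2) :: t2).lookup k2).getD 0)
        = max v2 0 := by rw [hmiss]; simp [List.lookup, max_comm]
    rw [hhead, if_gt_eq_max]
    ring

theorem sum_of_maxima_spec_aux (sample1 sample2 : List (String × Int))
    (h1 : (sample1.map Prod.fst).Nodup) (h2 : (sample2.map Prod.fst).Nodup) :
    sum_of_maxima sample1 sample2 = sum_of_maxima_alt sample1 sample2 := by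
  unfold sum_of_maxima sum_of_maxima_alt
  set s1 := PySem.List.sorted sample1 (fun kv => kv.1) false with hs1
  set s2 := PySem.List.sorted sample2 (fun kv => kv.1) false with hs2
  have hp1 : s1.Perm sample1 := PySem.List.sorted_perm _ _ _
  have hp2 : s2.Perm sample2 := PySem.List.sorted_perm _ _ _
  have hnd1 : (s1.map Prod.fst).Nodup := ((hp1.map Prod.fst).nodup_iff).mpr h1
  have hnd2 : (s2.map Prod.fst).Nodup := ((hp2.map Prod.fst).nodup_iff).mpr h2
  have hst1 : s1.Pairwise (fun a b => a.1 < b.1) :=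
    strict_of_le_nodup (PySem.List.sorted_pairwise _ _) hnd1
  have hst2 : s2.Pairwise (fun a b => a.1 < b.1) :=
    strict_of_le_nodup (PySem.List.sorted_pairwise _ _) hnd2
  rw [pvMergeSum_eq s1 s2 0 hst1 hst2, PySem.List.foldl_add]
  -- rewrite the merged-side lookups into lookups of the original lists
  have hfun : (fun k => max ((s1.lookup k).getD 0) ((s2.lookup k).getD 0))
      = (fun k => max ((sample1.lookup k).getD 0) ((sample2.lookup k).getD 0)) := by
    funext k
    rw [lookup_eq_of_perm hp1 h1, lookup_eq_of_perm hp2 h2]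
  rw [hfun]
  congr 1
  -- the merged key list is a permutation of A's deduplicated union of keys
  have hperm : (PySem.Set.ofList (sample1.map Prod.fst ++ sample2.map Prod.fst)).Perm
      (pvMKeys (s1.map Prod.fst) (s2.map Prod.fst)) := by
    rw [List.perm_ext_iff_of_nodup (PySem.Set.nodup_ofList _)
      ((pairwise_pvMKeys ((List.pairwise_map.mpr hst1).imp id)
        ((List.pairwise_map.mpr hst2).imp id)).imp ne_of_lt)]
    intro k
    rw [PySem.Set.mem_ofList, mem_pvMKeys, List.mem_append,
      (hp1.map Prod.fst).mem_iff, (hp2.map Prod.fst).mem_iff]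
  have := (hperm.map
    (fun k => max2 ((sample1.lookup k).getD 0) ((sample2.lookup k).getD 0))).sum_eq
  rw [this]
  refine congrArg List.sum (List.map_congr_left (fun k _ => ?_))
  rw [max2_eq_max]

-- ===== VERDICT (by name: the statement is the Claim_ definition above) =====
theorem sum_of_maxima_spec : Claim_equal_sum_of_maxima := by
  intro sample1 sample2 _ hpre
  exact sum_of_maxima_spec_aux sample1 sample2 hpre.1 hpre.2
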